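-- pv_equiv track=rewrite | github.com/RiteshF7/zunoapp | backend/scripts/resolve_env.py | _resolve_env
-- ===== SOURCE A (Python) =====
-- def _resolve_env(root_env: dict[str, str]) -> tuple[dict[str, str], dict[str, str]]:
--     """Resolve root env into dev and prod envs. Returns (dev_env, prod_env)."""
--     dev_env: dict[str, str] = {}
--     prod_env: dict[str, str] = {}
--
--     for key, val in root_env.items():
--         if key.endswith("_DEV"):
--             base = key[:-4]  # strip _DEV
--             # SUPABASE_DB_PASSWORD_DEV stays as-is (scripts read this exact name)
--             if key == "SUPABASE_DB_PASSWORD_DEV":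
--                 dev_env[key] = val
--             else:
--                 dev_env[base] = val
--         elif key.endswith("_PROD"):
--             base = key[:-5]  # strip _PROD
--             if key == "SUPABASE_DB_PASSWORD_PROD":
--                 prod_env[key] = val
--             else:
--                 prod_env[base] = val
--         else:
--             # Shared - goes to both
--             dev_env[key] = val
--             prod_env[key] = val
--
--     return dev_env, prod_env
-- ===== SOURCE B (Python) =====
-- def _resolve_env(root_env: dict[str, str]) -> tuple[dict[str, str], dict[str, str]]:
--     """Resolve root env into dev and prod envs. Returns (dev_env, prod_env)."""
--     # Pass 1: classify each key, in order, into (target, name, value) records.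
--     records = []
--     for key, val in root_env.items():
--         if key.endswith("_DEV"):
--             name = key if key == "SUPABASE_DB_PASSWORD_DEV" else key[:-4]
--             records.append(("dev", name, val))
--         elif key.endswith("_PROD"):
--             name = key if key == "SUPABASE_DB_PASSWORD_PROD" else key[:-5]
--             records.append(("prod", name, val))
--         else:
--             records.append(("both", key, val))
--     # Pass 2: write the records into their target dicts, preserving order.
--     dev_env: dict[str, str] = {}
--     prod_env: dict[str, str] = {}
--     for target, name, val in records:
--         if target != "prod":
--             dev_env[name] = val
--         if target != "dev":
--             prod_env[name] = val
--     return dev_env, prod_env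
-- ===== Notes on version B (the rewrite author's own statement) =====
-- stated objective: alternative
-- what changed: B splits the single classify-and-write loop into two passes: a first pass mapping each key to a (target, name, value) record, and a second pass writing the records into the dev/prod dicts.
import Mathlib
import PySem

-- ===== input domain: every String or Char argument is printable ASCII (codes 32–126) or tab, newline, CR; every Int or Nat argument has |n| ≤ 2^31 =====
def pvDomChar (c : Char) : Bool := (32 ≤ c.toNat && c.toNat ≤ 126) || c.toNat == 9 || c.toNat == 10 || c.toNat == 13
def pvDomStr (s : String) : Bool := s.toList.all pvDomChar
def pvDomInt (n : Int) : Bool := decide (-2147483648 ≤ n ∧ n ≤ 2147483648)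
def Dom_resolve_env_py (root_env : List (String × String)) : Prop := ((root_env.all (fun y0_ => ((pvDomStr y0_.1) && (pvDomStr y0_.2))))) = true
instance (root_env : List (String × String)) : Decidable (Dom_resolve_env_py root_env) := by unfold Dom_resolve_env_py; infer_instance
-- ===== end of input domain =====

-- B restructures A's single classify-and-write loop into two passes (classify to records, then write); same values, no speed claim.

-- ===== PORT A =====
-- one loop step of A: classify the key and insert into dev and/or prod in place
def pvStepA (s : PySem.Dict String String × PySem.Dict String String) (kv : String × String) :
    PySem.Dict String String × PySem.Dict String String :=
  let key := kv.1
  let val := kv.2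
  if PySem.Str.endswith key "_DEV" then
    let base := PySem.Str.slice key none (some (-4))
    if key == "SUPABASE_DB_PASSWORD_DEV" then (s.1.insert key val, s.2)
    else (s.1.insert base val, s.2)
  else if PySem.Str.endswith key "_PROD" then
    let base := PySem.Str.slice key none (some (-5))
    if key == "SUPABASE_DB_PASSWORD_PROD" then (s.1, s.2.insert key val)
    else (s.1, s.2.insert base val)
  else
    (s.1.insert key val, s.2.insert key val)

def resolve_env_py (root_env : List (String × String)) : (List (String × String)) × (List (String × String)) :=
  let fin := root_env.foldl pvStepA (PySem.Dict.empty, PySem.Dict.empty)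
  (fin.1.items, fin.2.items)

-- ===== PORT B =====
-- pass 1: one (target, name, value) record per key
def pvClassify (kv : String × String) : String × String × String :=
  let key := kv.1
  let val := kv.2
  if PySem.Str.endswith key "_DEV" then
    ("dev", (if key == "SUPABASE_DB_PASSWORD_DEV" then key else PySem.Str.slice key none (some (-4))), val)
  else if PySem.Str.endswith key "_PROD" then
    ("prod", (if key == "SUPABASE_DB_PASSWORD_PROD" then key else PySem.Str.slice key none (some (-5))), val)
  else
    ("both", key, val)

-- pass 2: write one record into its target dict(s)
def pvWrite (s : PySem.Dict String String × PySem.Dict String String) (r : String × String × String) :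
    PySem.Dict String String × PySem.Dict String String :=
  let dev := if r.1 != "prod" then s.1.insert r.2.1 r.2.2 else s.1
  let prod := if r.1 != "dev" then s.2.insert r.2.1 r.2.2 else s.2
  (dev, prod)

def resolve_env_py_alt (root_env : List (String × String)) : (List (String × String)) × (List (String × String)) :=
  let records := root_env.map pvClassify
  let fin := records.foldl pvWrite (PySem.Dict.empty, PySem.Dict.empty)
  (fin.1.items, fin.2.items)

-- ===== PRECONDITION & SPEC =====
def Spec_resolve_env_py (root_env : List (String × String)) (out : (List (String × String)) × (List (String × String))) : Prop := out = resolve_env_py_alt root_env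
instance (root_env : List (String × String)) (out : (List (String × String)) × (List (String × String))) : Decidable (Spec_resolve_env_py root_env out) := by unfold Spec_resolve_env_py; infer_instance

-- ===== CLAIM (what is proved, stated in full; the proofs are below) =====
def Claim_equal_resolve_env_py : Prop := ∀ (root_env : List (String × String)), Dom_resolve_env_py root_env → Spec_resolve_env_py root_env (resolve_env_py root_env)

-- ===== LEMMAS AND PROOFS =====

-- A's loop step equals B's write step applied to B's classification of the same pair
theorem pvStepA_eq_write_classify (s : PySem.Dict String String × PySem.Dict String String)
    (kv : String × String) : pvStepA s kv = pvWrite s (pvClassify kv) := by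
  simp only [pvStepA, pvClassify, pvWrite]
  split_ifs <;> simp_all

-- ===== VERDICT (by name: the statement is the Claim_ definition above) =====
theorem resolve_env_py_spec : Claim_equal_resolve_env_py := by
  intro root_env _
  unfold Spec_resolve_env_py
  simp only [resolve_env_py, resolve_env_py_alt, List.foldl_map]
  have h : List.foldl pvStepA (PySem.Dict.empty, PySem.Dict.empty) root_env =
      List.foldl (fun s kv => pvWrite s (pvClassify kv)) (PySem.Dict.empty, PySem.Dict.empty) root_env :=
    by apply PySem.List.foldl_congr_mem; intro acc x _; exact pvStepA_eq_write_classify acc x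
  rw [h]
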